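-- pv_equiv track=rewrite | github.com/raphick-py/mpei | TCP_IP_data_idf_check.py | Represent
-- ===== SOURCE A (Python) =====
-- def Represent(data):
--     Count = {"UDP": 0, "ICMP": 0, "TCP": 0}
--     for item in data:
--         if "UDP" in item:
--             Count["UDP"] += 1
--         if "ICMP" in item:
--             Count["ICMP"] += 1
--         if "TCP" in item:
--             Count["TCP"] += 1
--     return Count
-- ===== SOURCE B (Python) =====
-- def Represent(data):
--     return {k: sum(1 for item in data if k in item) for k in ("UDP", "ICMP", "TCP")}
-- ===== Notes on version B (the rewrite author's own statement) =====
-- stated objective: idiomatic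
-- what changed: Replaces A's single pass that incrementally updates one dict with three membership tests per item by a dict comprehension that makes one independent full scan of data per key, summing a 0/1 count for that key.
import Mathlib
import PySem

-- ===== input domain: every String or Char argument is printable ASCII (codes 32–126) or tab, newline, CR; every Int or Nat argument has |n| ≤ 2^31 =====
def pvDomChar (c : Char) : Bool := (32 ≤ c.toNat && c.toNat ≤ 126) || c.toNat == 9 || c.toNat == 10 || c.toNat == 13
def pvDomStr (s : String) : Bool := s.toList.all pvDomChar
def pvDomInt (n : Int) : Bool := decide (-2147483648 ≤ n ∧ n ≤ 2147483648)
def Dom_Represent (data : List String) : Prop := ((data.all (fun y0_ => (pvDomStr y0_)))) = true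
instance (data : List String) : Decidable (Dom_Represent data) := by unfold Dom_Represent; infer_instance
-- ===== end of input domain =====

-- B replaces A's single combined pass updating one dict by one independent scan of data per key (idiomatic dict comprehension); same result.

-- ===== PORT A =====
-- one loop body iteration: the three 'if "K" in item: Count["K"] += 1' statements
def pvStep (d : PySem.Dict String Int) (item : String) : PySem.Dict String Int :=
  let d1 := if PySem.Str.isIn "UDP" item then d.insert "UDP" (d.getD "UDP" 0 + 1) else d
  let d2 := if PySem.Str.isIn "ICMP" item then d1.insert "ICMP" (d1.getD "ICMP" 0 + 1) else d1
  if PySem.Str.isIn "TCP" item then d2.insert "TCP" (d2.getD "TCP" 0 + 1) else d2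

def Represent (data : List String) : List (String × Int) :=
  (data.foldl pvStep (PySem.Dict.ofList [("UDP", 0), ("ICMP", 0), ("TCP", 0)])).items

-- ===== PORT B =====
def Represent_alt (data : List String) : List (String × Int) :=
  (["UDP", "ICMP", "TCP"]).map
    (fun k => (k, (data.map (fun item => if PySem.Str.isIn k item then (1 : Int) else 0)).sum))

-- ===== PRECONDITION & SPEC =====
def Spec_Represent (data : List String) (out : List (String × Int)) : Prop := out = Represent_alt data
instance (data : List String) (out : List (String × Int)) : Decidable (Spec_Represent data out) := by unfold Spec_Represent; infer_instance

-- ===== CLAIM (what is proved, stated in full; the proofs are below) =====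
def Claim_equal_Represent : Prop := ∀ (data : List String), Dom_Represent data → Spec_Represent data (Represent data)

-- ===== LEMMAS AND PROOFS =====
def pvCnt (k : String) (l : List String) : Int :=
  (l.map (fun item => if PySem.Str.isIn k item then (1 : Int) else 0)).sum

theorem pvStep_mk (a b c : Int) (item : String) :
    pvStep (PySem.Dict.mk [("UDP", a), ("ICMP", b), ("TCP", c)]) item =
      PySem.Dict.mk [("UDP", a + (if PySem.Str.isIn "UDP" item then 1 else 0)),
                     ("ICMP", b + (if PySem.Str.isIn "ICMP" item then 1 else 0)),
                     ("TCP", c + (if PySem.Str.isIn "TCP" item then 1 else 0))] := by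
  simp only [pvStep]
  split_ifs <;> simp_all [PySem.Dict.insert, PySem.Dict.getD, PySem.Dict.get?, PySem.Dict.contains]

theorem pvFold_inv (l : List String) (a b c : Int) :
    l.foldl pvStep (PySem.Dict.mk [("UDP", a), ("ICMP", b), ("TCP", c)]) =
      PySem.Dict.mk [("UDP", a + pvCnt "UDP" l), ("ICMP", b + pvCnt "ICMP" l),
                     ("TCP", c + pvCnt "TCP" l)] := by
  induction l generalizing a b c with
  | nil => simp [pvCnt]
  | cons x xs ih =>
    rw [List.foldl_cons, pvStep_mk, ih]
    simp [pvCnt, add_assoc]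

theorem Represent_eq_alt (data : List String) : Represent data = Represent_alt data := by
  have h : PySem.Dict.ofList [("UDP", (0 : Int)), ("ICMP", 0), ("TCP", 0)] =
      PySem.Dict.mk [("UDP", 0), ("ICMP", 0), ("TCP", 0)] := by decide
  simp [Represent, Represent_alt, h, pvFold_inv, pvCnt]

-- ===== VERDICT (by name: the statement is the Claim_ definition above) =====
theorem Represent_spec : Claim_equal_Represent := by
  intro data _
  exact Represent_eq_alt data
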